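-- pv_equiv track=rewrite | github.com/CarlSpacklersGopher/AdventOfCode_2022 | day_06/day_06.py | find_message_start
-- ===== SOURCE A (Python) =====
-- def find_message_start(datastream:str) -> int:
--     '''
--     Given datastream, returns the index that the message starts (not including the marker)
--     '''
--     marker_length = 4
--     message_start = -1
--     for i in range(len(datastream)):
--         potential_marker = datastream[i: i + marker_length]
--         if len(set(potential_marker)) == marker_length: # unique
--             message_start = i + marker_length
--             break
--     return message_start
-- ===== SOURCE B (Python) =====
-- def find_message_start(datastream: str) -> int:
--     '''
--     Given datastream, returns the index that the message starts (not including the marker)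
--     '''
--     a = b = c = None
--     for j, d in enumerate(datastream):
--         if j >= 3 and a != b and a != c and a != d and b != c and b != d and c != d:
--             return j + 1
--         a, b, c = b, c, d
--     return -1
-- ===== Notes on version B (the rewrite author's own statement) =====
-- stated objective: faster
-- what changed: Instead of slicing a 4-char window and building a set at every index, B streams over the string once carrying only the previous three characters and returns when the current character and those three are pairwise distinct, avoiding the per-index slice and set allocations.
import Mathlib
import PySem

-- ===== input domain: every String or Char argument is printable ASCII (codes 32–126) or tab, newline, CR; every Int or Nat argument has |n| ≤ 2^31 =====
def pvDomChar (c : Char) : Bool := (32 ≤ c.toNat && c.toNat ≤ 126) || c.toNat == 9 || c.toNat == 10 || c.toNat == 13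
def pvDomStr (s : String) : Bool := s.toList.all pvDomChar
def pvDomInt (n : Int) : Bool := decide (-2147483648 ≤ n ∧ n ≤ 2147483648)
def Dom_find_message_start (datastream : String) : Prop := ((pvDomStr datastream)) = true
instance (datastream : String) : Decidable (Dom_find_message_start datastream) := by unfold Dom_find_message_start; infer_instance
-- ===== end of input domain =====

-- B streams over the string once carrying the previous three characters and checks the four chars pairwise,
-- instead of slicing a window and building a set at every index (alternative decomposition, same asymptotics).


-- ===== PORT A =====
-- loop 'for i in range(len(datastream))' with early break, as structural recursion over the index list
def pvALoop (cs : List Char) : List Int → Int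
  | [] => -1
  | i :: rest =>
    let potential_marker := PySem.List.slice cs (some i) (some (i + 4))
    if (PySem.Set.ofList potential_marker).length = 4 then i + 4
    else pvALoop cs rest

def find_message_start (datastream : String) : Int :=
  pvALoop datastream.toList (PySem.List.pyRange 0 (PySem.Str.len datastream) 1)

-- ===== PORT B =====
-- one pass: a b c hold the previous three characters (None before they exist), j the current index
def pvBLoop (a b c : Option Char) (j : Int) : List Char → Int
  | [] => -1
  | d :: rest =>
    if 3 ≤ j ∧ a ≠ b ∧ a ≠ c ∧ a ≠ some d ∧ b ≠ c ∧ b ≠ some d ∧ c ≠ some d then j + 1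
    else pvBLoop b c (some d) (j + 1) rest

def find_message_start_alt (datastream : String) : Int :=
  pvBLoop none none none 0 datastream.toList

-- ===== PRECONDITION & SPEC =====
def Spec_find_message_start (datastream : String) (out : Int) : Prop := out = find_message_start_alt datastream
instance (datastream : String) (out : Int) : Decidable (Spec_find_message_start datastream out) := by unfold Spec_find_message_start; infer_instance

-- ===== CLAIM (what is proved, stated in full; the proofs are below) =====
def Claim_equal_find_message_start : Prop := ∀ (datastream : String), Dom_find_message_start datastream → Spec_find_message_start datastream (find_message_start datastream)

-- ===== LEMMAS AND PROOFS =====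

-- common middle form: scan the suffix, checking the first 4 chars of each tail
def awin : List Char → Int → Int
  | [], _ => -1
  | c :: rest, off =>
    if (PySem.Set.ofList ((c :: rest).take 4)).length = 4 then off + 4
    else awin rest (off + 1)

theorem awin_short (l : List Char) (off : Int) (h : l.length < 4) : awin l off = -1 := by
  induction l generalizing off with
  | nil => rfl
  | cons c rest ih =>
    have hle : (PySem.Set.ofList ((c :: rest).take 4)).length ≤ ((c :: rest).take 4).length :=
      PySem.Set.length_ofList_le _
    have hlen : ((c :: rest).take 4).length < 4 := by
      rw [List.length_take]; omega
    rw [awin, if_neg (by omega)]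
    exact ih _ (by simpa using Nat.lt_of_succ_lt h)

theorem ofList_length_eq_iff_nodup (l : List Char) :
    (PySem.Set.ofList l).length = l.length ↔ l.Nodup := by
  constructor
  · intro h
    have hperm : (PySem.Set.ofList l).Perm l.dedup := by
      refine (List.perm_ext_iff_of_nodup (PySem.Set.nodup_ofList l) l.nodup_dedup).2 ?_
      intro x; rw [PySem.Set.mem_ofList, List.mem_dedup]
    have := hperm.length_eq
    have hd : l.dedup.length = l.length := by omega
    have : l.dedup = l := List.dedup_eq_self.2 ?_
    · exact this ▸ l.nodup_dedup
    · exact (List.Sublist.eq_of_length l.dedup_sublist hd) ▸ l.nodup_dedup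
  · intro h; rw [PySem.Set.ofList_eq_self_of_nodup l h]

theorem ofList4 (a b c d : Char) :
    ((PySem.Set.ofList [a, b, c, d]).length = 4) ↔
      (a ≠ b ∧ a ≠ c ∧ a ≠ d ∧ b ≠ c ∧ b ≠ d ∧ c ≠ d) := by
  have := ofList_length_eq_iff_nodup [a, b, c, d]
  simp only [List.length_cons, List.length_nil] at this
  rw [this]
  simp [List.nodup_cons]
  tauto

theorem bloop_eq_awin (rest : List Char) (a b c : Char) (j : Int) (hj : 3 ≤ j) :
    pvBLoop (some a) (some b) (some c) j rest = awin (a :: b :: c :: rest) (j - 3) := by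
  induction rest generalizing a b c j with
  | nil =>
    rw [pvBLoop, awin_short _ _ (by simp)]
  | cons d rest ih =>
    have hcond : ((PySem.Set.ofList ((a :: b :: c :: d :: rest).take 4)).length = 4) ↔
        ((some a : Option Char) ≠ some b ∧ (some a : Option Char) ≠ some c ∧
         (some a : Option Char) ≠ some d ∧ (some b : Option Char) ≠ some c ∧
         (some b : Option Char) ≠ some d ∧ (some c : Option Char) ≠ some d) := by
      simpa using ofList4 a b c d
    rw [pvBLoop, awin]
    by_cases h : (PySem.Set.ofList ((a :: b :: c :: d :: rest).take 4)).length = 4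
    · rw [if_pos h, if_pos ⟨hj, hcond.1 h⟩]; omega
    · rw [if_neg h, if_neg (by intro hc; exact h (hcond.2 hc.2))]
      rw [ih b c d (j + 1) (by omega)]
      congr 1; omega

theorem bstart_eq_awin (cs : List Char) : pvBLoop none none none 0 cs = awin cs 0 := by
  match cs with
  | [] => rfl
  | [d0] =>
    rw [pvBLoop, if_neg (by simp), pvBLoop]
    rw [awin_short _ _ (by simp)]
  | [d0, d1] =>
    rw [pvBLoop, if_neg (by simp), pvBLoop, if_neg (by simp), pvBLoop]
    rw [awin_short _ _ (by simp)]
  | [d0, d1, d2] =>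
    rw [pvBLoop, if_neg (by simp), pvBLoop, if_neg (by simp), pvBLoop, if_neg (by simp), pvBLoop]
    rw [awin_short _ _ (by simp)]
  | d0 :: d1 :: d2 :: d3 :: rest =>
    rw [pvBLoop, if_neg (by simp), pvBLoop, if_neg (by simp), pvBLoop, if_neg (by simp)]
    rw [bloop_eq_awin]
    · norm_num
    · omega

theorem aloop_eq_awin (cs : List Char) (l : List Char) (k : ℕ) (h : cs.drop k = l) :
    pvALoop cs (PySem.List.pyRange k cs.length 1) = awin l k := by
  induction l generalizing k with
  | nil =>
    have hk : (cs.length : Int) ≤ k := by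
      have := List.drop_eq_nil_iff.1 h
      exact_mod_cast this
    rw [PySem.List.pyRange_one_eq_nil hk, pvALoop, awin]
  | cons c rest ih =>
    have hk : k < cs.length := by
      rcases Nat.lt_or_ge k cs.length with h' | h'
      · exact h'
      · simp [List.drop_eq_nil_of_le h'] at h
    rw [PySem.List.pyRange_one_cons (by exact_mod_cast hk), pvALoop]
    have hslice : PySem.List.slice cs (some (k : Int)) (some ((k : Int) + 4)) =
        (cs.drop k).take 4 := by
      have := PySem.List.slice_natCast_add cs k 4
      simpa using this
    rw [hslice, h]
    rw [awin]
    by_cases hc : (PySem.Set.ofList ((c :: rest).take 4)).length = 4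
    · rw [if_pos hc, if_pos hc]
    · rw [if_neg hc, if_neg hc]
      have hrest : cs.drop (k + 1) = rest := by
        rw [← List.tail_drop, h]; rfl
      have := ih (k + 1) hrest
      rw [show ((k : Int) + 1) = ((k + 1 : ℕ) : Int) by push_cast; ring]
      exact this

-- ===== VERDICT (by name: the statement is the Claim_ definition above) =====
theorem find_message_start_spec : Claim_equal_find_message_start := by
  intro ds _
  unfold Spec_find_message_start find_message_start find_message_start_alt
  rw [bstart_eq_awin]
  have := aloop_eq_awin ds.toList ds.toList 0 (by simp)
  simpa [PySem.Str.len] using this
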